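-- pv_equiv track=rewrite | github.com/yuvika022/100DaysOfCode-2025 | DSA/N_PARTH_PANDEY_590012761/Day13Question1.py | word_count_and_longest_word
-- ===== SOURCE A (Python) =====
-- def word_count_and_longest_word(s):
--
--     trimmed = s.strip()
--     if not trimmed:
--         return "Word count: 0\nLongest word: \"\""
--
--     words = []
--     current_word = []
--
--     for char in trimmed:
--         if char != ' ':
--             current_word.append(char)
--         else:
--             if current_word:
--                 words.append(''.join(current_word))
--                 current_word = []
--
--     if current_word:
--         words.append(''.join(current_word))
--
--     word_count = len(words)
--     longest_word = max(words, key=len) if words else ""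
--
--     return f"Word count: {word_count}\nLongest word: \"{longest_word}\""
-- ===== SOURCE B (Python) =====
-- def word_count_and_longest_word(s):
--     trimmed = s.strip()
--     if not trimmed:
--         return "Word count: 0\nLongest word: \"\""
--
--     count = 0
--     cur = []
--     best = ""
--     for ch in trimmed:
--         if ch == ' ':
--             if cur:
--                 count += 1
--                 w = ''.join(cur)
--                 if len(w) > len(best):
--                     best = w
--                 cur = []
--         else:
--             cur.append(ch)
--     if cur:
--         count += 1
--         w = ''.join(cur)
--         if len(w) > len(best):
--             best = w
--
--     return f"Word count: {count}\nLongest word: \"{best}\""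
-- ===== Notes on version B (the rewrite author's own statement) =====
-- stated objective: alternative
-- what changed: B replaces A's build-a-word-list-then-max(key=len) with a single fold over the stripped string that maintains word_count, the current word buffer, and the running longest word (strict '>' keeps the first maximum), never materialising the word list.
import Mathlib
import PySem

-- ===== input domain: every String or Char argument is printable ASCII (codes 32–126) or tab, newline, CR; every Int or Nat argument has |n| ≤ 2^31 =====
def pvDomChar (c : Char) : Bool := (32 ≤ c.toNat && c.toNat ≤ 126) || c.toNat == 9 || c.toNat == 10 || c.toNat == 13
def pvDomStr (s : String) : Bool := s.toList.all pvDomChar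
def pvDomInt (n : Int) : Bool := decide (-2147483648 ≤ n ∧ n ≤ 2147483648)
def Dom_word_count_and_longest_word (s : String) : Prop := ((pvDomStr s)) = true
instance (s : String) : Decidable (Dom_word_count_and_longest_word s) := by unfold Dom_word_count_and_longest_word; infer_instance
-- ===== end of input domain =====

-- B is a single-pass fold (count / current buffer / running longest) instead of A's word list + max; return value only, no side effects.

-- ===== PORT A =====
-- the body of A's character loop: accumulate words and the current word
def pvAStep (st : List (List Char) × List Char) (c : Char) : List (List Char) × List Char :=
  if c ≠ ' ' then (st.1, st.2 ++ [c])
  else if st.2 ≠ [] then (st.1 ++ [st.2], [])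
  else st

def word_count_and_longest_word (s : String) : String :=
  let trimmed := PySem.Chars.strip s.toList
  if trimmed = [] then "Word count: 0\nLongest word: \"\""
  else
    let st := trimmed.foldl pvAStep ([], [])
    let words := if st.2 ≠ [] then st.1 ++ [st.2] else st.1
    let word_count : Int := PySem.List.len words
    let longest : List Char :=
      if words ≠ [] then (PySem.List.max? words (fun w => w.length)).getD [] else []
    String.mk ("Word count: ".toList ++ PySem.Int.toChars word_count ++
               "\nLongest word: \"".toList ++ longest ++ "\"".toList)

-- ===== PORT B =====
-- the body of B's single-pass loop: (count, current buffer, best word so far)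
def pvBStep (st : Int × List Char × List Char) (c : Char) : Int × List Char × List Char :=
  if c = ' ' then
    if st.2.1 ≠ [] then
      (st.1 + 1, [], if st.2.1.length > st.2.2.length then st.2.1 else st.2.2)
    else st
  else (st.1, st.2.1 ++ [c], st.2.2)

def word_count_and_longest_word_alt (s : String) : String :=
  let trimmed := PySem.Chars.strip s.toList
  if trimmed = [] then "Word count: 0\nLongest word: \"\""
  else
    let st := trimmed.foldl pvBStep (0, [], [])
    let fin : Int × List Char :=
      if st.2.1 ≠ [] then
        (st.1 + 1, if st.2.1.length > st.2.2.length then st.2.1 else st.2.2)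
      else (st.1, st.2.2)
    String.mk ("Word count: ".toList ++ PySem.Int.toChars fin.1 ++
               "\nLongest word: \"".toList ++ fin.2 ++ "\"".toList)

-- ===== PRECONDITION & SPEC =====
def Spec_word_count_and_longest_word (s : String) (out : String) : Prop := out = word_count_and_longest_word_alt s
instance (s : String) (out : String) : Decidable (Spec_word_count_and_longest_word s out) := by unfold Spec_word_count_and_longest_word; infer_instance

-- ===== CLAIM (what is proved, stated in full; the proofs are below) =====
def Claim_equal_word_count_and_longest_word : Prop := ∀ (s : String), Dom_word_count_and_longest_word s → Spec_word_count_and_longest_word s (word_count_and_longest_word s)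

-- ===== LEMMAS AND PROOFS =====

-- B's longest-word update, as a fold step over the list of words
def pvBest (b w : List Char) : List Char := if w.length > b.length then w else b

lemma pvMax_go (t : List (List Char)) (b : List Char) :
    PySem.List.max? (b :: t) (fun w => w.length) = some (List.foldl pvBest b t) := by
  induction t generalizing b with
  | nil => rfl
  | cons y t ih =>
    have e1 : PySem.List.max? (b :: y :: t) (fun w => w.length)
        = PySem.List.max? (pvBest b y :: t) (fun w => w.length) := by
      by_cases h : b.length < y.length <;>
        simp [PySem.List.max?, pvBest, h, gt_iff_lt]
    rw [e1, ih (pvBest b y), List.foldl_cons]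

lemma pvMax_eq (ws : List (List Char)) (hne : ws ≠ []) (hwords : ∀ w ∈ ws, w ≠ []) :
    (PySem.List.max? ws (fun w => w.length)).getD [] = List.foldl pvBest [] ws := by
  cases ws with
  | nil => exact absurd rfl hne
  | cons x t =>
    have hx : x ≠ [] := hwords x (List.mem_cons_self)
    have hx' : pvBest [] x = x := by
      cases x with
      | nil => exact absurd rfl hx
      | cons _ _ => simp [pvBest]
    rw [pvMax_go, Option.getD_some, List.foldl_cons, hx']

-- the loop invariant: B's state mirrors A's (count = #words, same buffer, best = fold of pvBest)
lemma pvLoop (cs : List Char) (ws : List (List Char)) (cur : List Char)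
    (hws : ∀ w ∈ ws, w ≠ []) :
    List.foldl pvBStep ((ws.length : Int), cur, List.foldl pvBest [] ws) cs
      = (((List.foldl pvAStep (ws, cur) cs).1.length : Int),
         (List.foldl pvAStep (ws, cur) cs).2,
         List.foldl pvBest [] (List.foldl pvAStep (ws, cur) cs).1)
    ∧ ∀ w ∈ (List.foldl pvAStep (ws, cur) cs).1, w ≠ [] := by
  induction cs generalizing ws cur with
  | nil => exact ⟨rfl, hws⟩
  | cons c rest ih =>
    simp only [List.foldl_cons]
    by_cases hc : c = ' '
    · by_cases hcur : cur = []
      · have ha : pvAStep (ws, cur) c = (ws, cur) := by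
          simp [pvAStep, hc, hcur]
        have hb : pvBStep ((ws.length : Int), cur, List.foldl pvBest [] ws) c
            = ((ws.length : Int), cur, List.foldl pvBest [] ws) := by
          simp [pvBStep, hc, hcur]
        rw [ha, hb]; exact ih ws cur hws
      · have ha : pvAStep (ws, cur) c = (ws ++ [cur], []) := by
          simp [pvAStep, hc, hcur]
        have hb : pvBStep ((ws.length : Int), cur, List.foldl pvBest [] ws) c
            = (((ws ++ [cur]).length : Int), [], List.foldl pvBest [] (ws ++ [cur])) := by
          simp [pvBStep, hc, hcur, pvBest, List.foldl_append]
        rw [ha, hb]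
        exact ih (ws ++ [cur]) [] (by
          intro w hw
          rcases List.mem_append.mp hw with h | h
          · exact hws w h
          · simp at h; subst h; exact hcur)
    · have ha : pvAStep (ws, cur) c = (ws, cur ++ [c]) := by
        simp [pvAStep, hc]
      have hb : pvBStep ((ws.length : Int), cur, List.foldl pvBest [] ws) c
          = ((ws.length : Int), cur ++ [c], List.foldl pvBest [] ws) := by
        simp [pvBStep, hc]
      rw [ha, hb]; exact ih ws (cur ++ [c]) hws

-- ===== VERDICT (by name: the statement is the Claim_ definition above) =====
theorem word_count_and_longest_word_spec : Claim_equal_word_count_and_longest_word := by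
  intro s _
  unfold Spec_word_count_and_longest_word word_count_and_longest_word word_count_and_longest_word_alt
  by_cases ht : PySem.Chars.strip s.toList = []
  · simp [ht]
  · simp only [ht, if_false]
    obtain ⟨hstate, hne⟩ := pvLoop (PySem.Chars.strip s.toList) [] [] (by simp)
    simp only [List.length_nil, Nat.cast_zero, List.foldl_nil] at hstate
    set stA := List.foldl pvAStep ([], []) (PySem.Chars.strip s.toList) with hA
    rw [hstate]
    by_cases hcur : stA.2 = []
    · simp only [hcur, ne_eq, not_true_eq_false, if_false, ite_not]
      by_cases hw : stA.1 = []
      · simp [hw, PySem.List.len]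
      · simp [hw, PySem.List.len, pvMax_eq stA.1 hw hne]
    · simp only [hcur, ne_eq, not_false_eq_true, if_true]
      have hne' : ∀ w ∈ stA.1 ++ [stA.2], w ≠ [] := by
        intro w hw
        rcases List.mem_append.mp hw with h | h
        · exact hne w h
        · simp at h; subst h; exact hcur
      have hnil : stA.1 ++ [stA.2] ≠ [] := by simp
      simp [hnil, PySem.List.len, pvMax_eq _ hnil hne', List.foldl_append, pvBest]
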